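-- pv_equiv track=rewrite | github.com/roma7481/numerology_react | scripts/translate-missing.py | get_best_source
-- ===== SOURCE A (Python) =====
-- SOURCE_PRIORITY = ['en', 'ru', 'es', 'fr', 'de', 'it', 'pt']
--
-- def get_best_source(available_locales, target_locale):
--     """Pick the best source locale for translation."""
--     for pref in SOURCE_PRIORITY:
--         if pref in available_locales and pref != target_locale:
--             return pref
--     # Fallback: any available locale that isn't the target
--     for loc in available_locales:
--         if loc != target_locale:
--             return loc
--     return None
-- ===== SOURCE B (Python) =====
-- SOURCE_PRIORITY = ['en', 'ru', 'es', 'fr', 'de', 'it', 'pt']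
--
-- def get_best_source(available_locales, target_locale):
--     """Pick the best source locale for translation."""
--     def rank(loc):
--         return SOURCE_PRIORITY.index(loc) if loc in SOURCE_PRIORITY else len(SOURCE_PRIORITY)
--     ranked = sorted(available_locales, key=rank)
--     return next((loc for loc in ranked if loc != target_locale), None)
-- ===== Notes on version B (the rewrite author's own statement) =====
-- stated objective: alternative
-- what changed: Replaces A's two separate scans (one over SOURCE_PRIORITY testing membership, then a fallback scan over the input) with one stable sort of the available locales by priority rank followed by a single pass returning the first non-target locale.
import Mathlib
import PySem

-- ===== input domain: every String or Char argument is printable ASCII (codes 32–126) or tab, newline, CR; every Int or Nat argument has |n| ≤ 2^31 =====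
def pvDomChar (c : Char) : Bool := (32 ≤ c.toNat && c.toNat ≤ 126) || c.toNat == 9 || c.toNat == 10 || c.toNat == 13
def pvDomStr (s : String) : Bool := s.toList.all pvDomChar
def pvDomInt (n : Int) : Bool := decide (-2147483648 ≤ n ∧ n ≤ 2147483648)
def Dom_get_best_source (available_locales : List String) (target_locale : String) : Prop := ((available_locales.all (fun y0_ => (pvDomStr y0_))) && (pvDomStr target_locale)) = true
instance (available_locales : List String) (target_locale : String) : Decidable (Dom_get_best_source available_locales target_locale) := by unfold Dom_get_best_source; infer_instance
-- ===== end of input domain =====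

-- B replaces A's two scans (priority scan with membership tests, then a fallback scan)
-- by one stable sort of the available locales by priority rank and a single pass; objective: alternative.

def SOURCE_PRIORITY : List String := ["en", "ru", "es", "fr", "de", "it", "pt"]

-- ===== PORT A =====
-- first loop: for pref in SOURCE_PRIORITY: if pref in available_locales and pref != target_locale: return pref
def gbsLoop1 : List String → List String → String → Option String
  | [], _, _ => none
  | pref :: rest, avail, tgt =>
    if avail.contains pref && pref != tgt then some pref else gbsLoop1 rest avail tgt

-- fallback loop: for loc in available_locales: if loc != target_locale: return loc
def gbsLoop2 : List String → String → Option String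
  | [], _ => none
  | loc :: rest, tgt => if loc != tgt then some loc else gbsLoop2 rest tgt

def get_best_source (available_locales : List String) (target_locale : String) : Option String :=
  match gbsLoop1 SOURCE_PRIORITY available_locales target_locale with
  | some pref => some pref
  | none => gbsLoop2 available_locales target_locale

-- ===== PORT B =====
-- rank(loc) = SOURCE_PRIORITY.index(loc) if loc in SOURCE_PRIORITY else len(SOURCE_PRIORITY)
def gbsRank (loc : String) : Nat :=
  if SOURCE_PRIORITY.contains loc then
    (PySem.List.index? SOURCE_PRIORITY loc).getD SOURCE_PRIORITY.length
  else SOURCE_PRIORITY.length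

def get_best_source_alt (available_locales : List String) (target_locale : String) : Option String :=
  let ranked := PySem.List.sorted available_locales gbsRank
  ranked.find? (fun loc => loc != target_locale)

-- ===== PRECONDITION & SPEC =====
def Spec_get_best_source (available_locales : List String) (target_locale : String) (out : Option String) : Prop := out = get_best_source_alt available_locales target_locale
instance (available_locales : List String) (target_locale : String) (out : Option String) : Decidable (Spec_get_best_source available_locales target_locale out) := by unfold Spec_get_best_source; infer_instance

-- ===== CLAIM (what is proved, stated in full; the proofs are below) =====
def Claim_equal_get_best_source : Prop := ∀ (available_locales : List String) (target_locale : String), Dom_get_best_source available_locales target_locale → Spec_get_best_source available_locales target_locale (get_best_source available_locales target_locale)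

-- ===== LEMMAS AND PROOFS =====

-- rank of a locale within an arbitrary priority list (generic form of gbsRank)
def rankIn (pl : List String) (l : String) : Nat := (List.idxOf? l pl).getD pl.length

theorem rankIn_cons (q : String) (rest : List String) (l : String) :
    rankIn (q :: rest) l = if l = q then 0 else rankIn rest l + 1 := by
  unfold rankIn
  rw [List.idxOf?_cons]
  by_cases h : l = q
  · simp [h]
  · cases hi : List.idxOf? l rest <;> simp [hi, h, Ne.symm h]

theorem rankIn_le (pl : List String) (l : String) : rankIn pl l ≤ pl.length := by
  induction pl with
  | nil => simp [rankIn]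
  | cons q rest ih =>
    rw [rankIn_cons]
    by_cases h : l = q <;> simp [h] <;> omega


theorem gbsRank_eq (l : String) : gbsRank l = rankIn SOURCE_PRIORITY l := by
  unfold gbsRank rankIn PySem.List.index?
  split
  · rfl
  · next hc =>
    rw [List.idxOf?_eq_none_iff.mpr (by simpa [List.contains_eq_mem] using hc)]
    rfl

theorem gbsRank_le (l : String) : gbsRank l ≤ 7 := by
  have := rankIn_le SOURCE_PRIORITY l
  rw [gbsRank_eq]; simpa [SOURCE_PRIORITY] using this

theorem gbsRank_of_not_mem (l : String) (h : l ∉ SOURCE_PRIORITY) : gbsRank l = 7 := by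
  rw [gbsRank_eq]
  unfold rankIn
  rw [List.idxOf?_eq_none_iff.mpr h]
  rfl

-- gbsLoop1 returns a minimal-rank available non-target locale, unique at its rank
theorem loop1_some (pl : List String) (avail : List String) (tgt p : String)
    (h : gbsLoop1 pl avail tgt = some p) :
    p ∈ avail ∧ p ≠ tgt ∧ ∀ y ∈ avail, y ≠ tgt →
      rankIn pl p ≤ rankIn pl y ∧ (rankIn pl y = rankIn pl p → y = p) := by
  induction pl with
  | nil => simp [gbsLoop1] at h
  | cons q rest ih =>
    by_cases c : (avail.contains q && q != tgt) = true
    · rw [gbsLoop1, if_pos c] at h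
      obtain ⟨hq, hqt⟩ := by simpa using c
      obtain rfl : q = p := by simpa using h
      refine ⟨hq, hqt, fun y _ _ => ?_⟩
      rw [rankIn_cons, rankIn_cons, if_pos rfl]
      by_cases hy : y = q <;> simp [hy]
    · rw [gbsLoop1, if_neg c] at h
      obtain ⟨hp, hpt, H⟩ := ih h
      have hnq : ¬ (q ∈ avail ∧ q ≠ tgt) := by simpa using c
      have hpq : p ≠ q := fun e => hnq ⟨e ▸ hp, e ▸ hpt⟩
      refine ⟨hp, hpt, fun y hy hyt => ?_⟩
      have hyq : y ≠ q := fun e => hnq ⟨e ▸ hy, e ▸ hyt⟩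
      obtain ⟨h1, h2⟩ := H y hy hyt
      rw [rankIn_cons, rankIn_cons, if_neg hpq, if_neg hyq]
      exact ⟨by omega, fun e => h2 (by omega)⟩

theorem loop1_none (pl : List String) (avail : List String) (tgt : String)
    (h : gbsLoop1 pl avail tgt = none) :
    ∀ y ∈ avail, y ≠ tgt → y ∉ pl := by
  induction pl with
  | nil => simp
  | cons q rest ih =>
    by_cases c : (avail.contains q && q != tgt) = true
    · rw [gbsLoop1, if_pos c] at h; exact absurd h (by simp)
    · rw [gbsLoop1, if_neg c] at h
      have hnq : ¬ (q ∈ avail ∧ q ≠ tgt) := by simpa using c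
      intro y hy hyt
      have hyq : y ≠ q := fun e => hnq ⟨e ▸ hy, e ▸ hyt⟩
      simpa [hyq] using ih h y hy hyt

theorem loop2_eq_find? (avail : List String) (tgt : String) :
    gbsLoop2 avail tgt = avail.find? (fun l => l != tgt) := by
  induction avail with
  | nil => rfl
  | cons l rest ih =>
    by_cases h : (l != tgt) = true
    · rw [gbsLoop2, if_pos h, List.find?_cons_of_pos (p := fun x => x != tgt) h]
    · rw [gbsLoop2, if_neg h, List.find?_cons_of_neg (p := fun x => x != tgt) h, ih]

-- find? over a rank-sorted list returns the minimal-rank non-target element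
theorem find?_sorted_min (tgt p : String) (s : List String)
    (hpw : s.Pairwise fun a b => gbsRank a ≤ gbsRank b)
    (hp : p ∈ s) (hpt : p ≠ tgt)
    (H : ∀ y ∈ s, y ≠ tgt → gbsRank p ≤ gbsRank y ∧ (gbsRank y = gbsRank p → y = p)) :
    s.find? (fun l => l != tgt) = some p := by
  induction s with
  | nil => simp at hp
  | cons h t ih =>
    rcases List.pairwise_cons.mp hpw with ⟨hht, hpw'⟩
    by_cases hq : h = tgt
    · have hph : p ≠ h := fun e => hpt (e.trans hq)
      have hpmem : p ∈ t := (List.mem_cons.mp hp).resolve_left hph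
      rw [List.find?_cons_of_neg (p := fun x => x != tgt) (by simp [hq])]
      exact ih hpw' hpmem fun y hy => H y (List.mem_cons_of_mem _ hy)
    · rw [List.find?_cons_of_pos (p := fun x => x != tgt) (by simp [hq])]
      obtain ⟨h1, h2⟩ := H h (List.mem_cons_self ..) hq
      rcases List.mem_cons.mp hp with rfl | hpm
      · rfl
      · exact congrArg some (h2 (le_antisymm (hht p hpm) h1))

theorem insertBy_split (before : String → String → Bool) (x : String) (ys : List String) :
    ∃ l1 l2, PySem.List.insertBy before x ys = l1 ++ x :: l2 ∧ ys = l1 ++ l2 := by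
  induction ys with
  | nil => exact ⟨[], [], rfl, rfl⟩
  | cons y ys ih =>
    by_cases h : before x y = true
    · exact ⟨[], y :: ys, by simp [PySem.List.insertBy, h], rfl⟩
    · obtain ⟨l1, l2, h1, h2⟩ := ih
      exact ⟨y :: l1, l2, by simp [PySem.List.insertBy, h, h1], by simp [h2]⟩

-- when every non-target locale has the sentinel rank, sorting does not change the first non-target
theorem find?_sorted_all7 (avail : List String) (tgt : String)
    (H : ∀ y ∈ avail, y ≠ tgt → gbsRank y = 7) :
    (PySem.List.sorted avail gbsRank).find? (fun l => l != tgt)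
      = avail.find? (fun l => l != tgt) := by
  induction avail using List.reverseRecOn with
  | nil => rfl
  | append_singleton xs x ih =>
    have hsplit : PySem.List.sorted (xs ++ [x]) gbsRank
        = PySem.List.insertBy (fun a b => decide (gbsRank a < gbsRank b)) x
            (PySem.List.sorted xs gbsRank) := by
      rw [PySem.List.sorted_eq_foldl_insertBy, PySem.List.sorted_eq_foldl_insertBy,
        List.foldl_append]
      rfl
    have ih' := ih fun y hy => H y (List.mem_append_left _ hy)
    by_cases hx : x = tgt
    · obtain ⟨l1, l2, h1, h2⟩ :=
        insertBy_split (fun a b => decide (gbsRank a < gbsRank b)) x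
          (PySem.List.sorted xs gbsRank)
      rw [hsplit, h1, List.find?_append, List.find?_cons_of_neg (p := fun x => x != tgt) (by simp [hx])]
      rw [h2, List.find?_append] at ih'
      rw [ih', List.find?_append, List.find?_cons_of_neg (p := fun x => x != tgt) (by simp [hx])]
      simp
    · have hx7 : gbsRank x = 7 := H x (List.mem_append_right _ (by simp)) hx
      rw [hsplit, PySem.List.insertBy_of_forall_not_before _ _ _
        (fun y _ => by have := gbsRank_le y; simp [hx7]; omega)]
      rw [List.find?_append, ih', ← List.find?_append]

-- ===== VERDICT (by name: the statement is the Claim_ definition above) =====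
theorem get_best_source_spec : Claim_equal_get_best_source := by
  intro avail tgt _dom
  unfold Spec_get_best_source get_best_source get_best_source_alt
  cases h : gbsLoop1 SOURCE_PRIORITY avail tgt with
  | none =>
    have H : ∀ y ∈ avail, y ≠ tgt → gbsRank y = 7 := fun y hy hyt =>
      gbsRank_of_not_mem y (loop1_none _ _ _ h y hy hyt)
    simp only [loop2_eq_find?, find?_sorted_all7 avail tgt H]
  | some p =>
    obtain ⟨hp, hpt, H⟩ := loop1_some _ _ _ _ h
    have := find?_sorted_min tgt p (PySem.List.sorted avail gbsRank)
      (PySem.List.sorted_pairwise avail gbsRank)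
      ((PySem.List.mem_sorted avail gbsRank false p).mpr hp) hpt
      (fun y hy hyt => by
        have hy' := (PySem.List.mem_sorted avail gbsRank false y).mp hy
        have := H y hy' hyt
        rw [gbsRank_eq, gbsRank_eq]
        exact this)
    simp [this]
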